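-- pv_equiv track=rewrite | github.com/jakdangers/algorithm | 42/2.py | solution
-- ===== SOURCE A (Python) =====
-- from collections import defaultdict
--
-- def solution(friends, user_id):
--     # 친구의 관계를 만든다 (중복되는 경우 없으므로 중복 검사 X)
--     friend_dic = defaultdict(list)
--     for f1, f2 in friends:
--         friend_dic[f1].append(f2)
--         friend_dic[f2].append(f1)
--
--     # 친구의 친구 중 가장 많이 나오는 친구를 선택하기 위해 출현빈도 카운트
--     friend_frequency = defaultdict(int)
--     max_frequency = 0
--     for friend in friend_dic[user_id]:
--         for ff in friend_dic[friend]: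
--             if ff != user_id:
--                 friend_frequency[ff] += 1
--                 max_frequency = max(max_frequency, friend_frequency[ff])
--
--     result = []
--     # 가장 높은 출현빈도를 갖은 친구의 친구를 선택 (동일 빈도인 경우 사전준 정렬)
--     for friend_name, frequency in friend_frequency.items():
--         if frequency == max_frequency:
--             result.append(friend_name)
--     result.sort()
--
--     return result
-- ===== SOURCE B (Python) =====
-- def solution(friends, user_id):
--     # multiset of the user's direct friends (multiplicity matters for duplicate edges / self-loops)
--     direct = {}
--     for a, b in friends:
--         if a == user_id:
--             direct[b] = direct.get(b, 0) + 1
--         if b == user_id: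
--             direct[a] = direct.get(a, 0) + 1
--     # one weighted pass over the edges: edge (a,b) makes b a friend-of-friend once per
--     # occurrence of a among the user's direct friends, and symmetrically
--     counts = {}
--     for a, b in friends:
--         da = direct.get(a, 0)
--         if b != user_id and da > 0:
--             counts[b] = counts.get(b, 0) + da
--         db = direct.get(b, 0)
--         if a != user_id and db > 0:
--             counts[a] = counts.get(a, 0) + db
--     if not counts:
--         return []
--     m = max(counts.values())
--     return sorted(name for name, c in counts.items() if c == m)
-- ===== Notes on version B (the rewrite author's own statement) =====
-- stated objective: alternative
-- what changed: B never builds per-node adjacency lists: it scans the edge list once to count each direct friend's multiplicity, then a second weighted edge scan accumulates friend-of-friend frequencies, replacing A's adjacency dict plus nested loop over adjacency lists.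
import Mathlib
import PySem

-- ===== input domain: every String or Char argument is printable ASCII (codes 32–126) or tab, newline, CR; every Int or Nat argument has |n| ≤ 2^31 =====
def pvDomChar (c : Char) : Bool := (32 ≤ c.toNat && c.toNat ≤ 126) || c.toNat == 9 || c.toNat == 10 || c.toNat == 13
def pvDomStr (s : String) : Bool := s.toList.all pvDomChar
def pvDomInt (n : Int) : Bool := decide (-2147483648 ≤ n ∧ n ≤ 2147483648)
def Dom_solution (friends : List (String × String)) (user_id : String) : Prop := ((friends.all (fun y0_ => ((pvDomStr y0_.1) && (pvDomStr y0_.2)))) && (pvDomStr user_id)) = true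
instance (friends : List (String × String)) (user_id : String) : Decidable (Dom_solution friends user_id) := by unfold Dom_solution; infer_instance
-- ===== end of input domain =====

-- B drops A's per-node adjacency lists: one edge scan counts direct-friend multiplicities,
-- a second weighted edge scan accumulates friend-of-friend frequencies (alternative decomposition, same result).


-- ===== PORT A =====
-- adjacency dict: friend_dic[f1].append(f2); friend_dic[f2].append(f1)  (defaultdict(list) -> Dict.modify with [] default)
def solution (friends : List (String × String)) (user_id : String) : List String :=
  let friend_dic : PySem.Dict String (List String) :=
    friends.foldl (fun d p => (d.modify p.1 [] (· ++ [p.2])).modify p.2 [] (· ++ [p.1]))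
      PySem.Dict.empty
  -- nested loop: for friend in friend_dic[user_id]: for ff in friend_dic[friend]: …
  let st : PySem.Dict String Int × Int :=
    (friend_dic.getD user_id []).foldl
      (fun st friend =>
        (friend_dic.getD friend []).foldl
          (fun st ff =>
            if ff ≠ user_id then
              let d' := st.1.modify ff 0 (· + 1)
              (d', max st.2 (d'.getD ff 0))
            else st)
          st)
      (PySem.Dict.empty, 0)
  let result := st.1.items.foldl (fun r p => if p.2 = st.2 then r ++ [p.1] else r) []
  PySem.List.sorted result (fun x => x) false

-- ===== PORT B =====
def solution_alt (friends : List (String × String)) (user_id : String) : List String :=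
  let direct : PySem.Dict String Int :=
    friends.foldl (fun d p =>
      let d := if p.1 = user_id then d.insert p.2 (d.getD p.2 0 + 1) else d
      if p.2 = user_id then d.insert p.1 (d.getD p.1 0 + 1) else d)
      PySem.Dict.empty
  let counts : PySem.Dict String Int :=
    friends.foldl (fun c p =>
      let da := direct.getD p.1 0
      let c := if p.2 ≠ user_id ∧ da > 0 then c.insert p.2 (c.getD p.2 0 + da) else c
      let db := direct.getD p.2 0
      if p.1 ≠ user_id ∧ db > 0 then c.insert p.1 (c.getD p.1 0 + db) else c)
      PySem.Dict.empty
  if counts.items = [] then []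
  else
    let m := (PySem.List.max? counts.values (fun v => v)).getD 0
    PySem.List.sorted ((counts.items.filter (fun p => p.2 = m)).map (·.1)) (fun x => x) false

-- ===== PRECONDITION & SPEC =====
def Spec_solution (friends : List (String × String)) (user_id : String) (out : List String) : Prop := out = solution_alt friends user_id
instance (friends : List (String × String)) (user_id : String) (out : List String) : Decidable (Spec_solution friends user_id out) := by unfold Spec_solution; infer_instance

-- ===== CLAIM (what is proved, stated in full; the proofs are below) =====
def Claim_equal_solution : Prop := ∀ (friends : List (String × String)) (user_id : String), Dom_solution friends user_id → Spec_solution friends user_id (solution friends user_id)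

-- ===== LEMMAS AND PROOFS =====

-- per-edge contribution of one edge p to f's adjacency list, exactly as A's loop appends
def pvDlist (f : String) (p : String × String) : List String :=
  (if p.1 = f then [p.2] else []) ++ (if p.2 = f then [p.1] else [])

-- adjacency list of f (the value A's friend_dic holds at f)
def pvAdj (friends : List (String × String)) (f : String) : List String :=
  friends.flatMap (pvDlist f)

-- the flattened stream of friend-of-friend names A's nested loop visits (user excluded)
def pvFF (friends : List (String × String)) (u : String) : List String :=
  ((pvAdj friends u).flatMap (fun f => pvAdj friends f)).filter (fun x => x ≠ u)

-- weighted contribution of one edge to B's counts at x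
def pvContrib (friends : List (String × String)) (u x : String) (p : String × String) : Int :=
  (if x = p.2 ∧ ¬(p.2 = u) then ((pvAdj friends u).count p.1 : Int) else 0) +
  (if x = p.1 ∧ ¬(p.1 = u) then ((pvAdj friends u).count p.2 : Int) else 0)

def pvCB (friends : List (String × String)) (u x : String) : Int :=
  (friends.map (pvContrib friends u x)).sum

-- A's inner-loop step
def pvStepA (u : String) (st : PySem.Dict String Int × Int) (ff : String) :
    PySem.Dict String Int × Int :=
  if ff ≠ u then
    let d' := st.1.modify ff 0 (· + 1)
    (d', max st.2 (d'.getD ff 0))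
  else st

-- B's counts-loop step (dd is the direct-friends dict)
def pvStepB (u : String) (dd : PySem.Dict String Int) (c : PySem.Dict String Int)
    (p : String × String) : PySem.Dict String Int :=
  let da := dd.getD p.1 0
  let c := if p.2 ≠ u ∧ da > 0 then c.insert p.2 (c.getD p.2 0 + da) else c
  let db := dd.getD p.2 0
  if p.1 ≠ u ∧ db > 0 then c.insert p.1 (c.getD p.1 0 + db) else c

lemma pv_pairs_adj (friends : List (String × String)) (c : String) :
    ((friends.flatMap (fun p => [(p.1, p.2), (p.2, p.1)])).filter
      (fun q => q.1 == c)).map (fun q => q.2) = pvAdj friends c := by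
  induction friends with
  | nil => rfl
  | cons p t ih =>
    simp only [List.flatMap_cons, List.filter_append, List.map_append, ih, pvAdj, pvDlist]
    congr 1
    by_cases h1 : p.1 = c <;> by_cases h2 : p.2 = c <;> simp [h1, h2]

lemma pv_adj_getD (friends : List (String × String)) (c : String) :
    (friends.foldl
      (fun d p => (d.modify p.1 [] (· ++ [p.2])).modify p.2 [] (· ++ [p.1]))
      (PySem.Dict.empty : PySem.Dict String (List String))).getD c [] = pvAdj friends c := by
  have h1 : friends.foldl
      (fun d p => (d.modify p.1 [] (· ++ [p.2])).modify p.2 [] (· ++ [p.1]))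
      (PySem.Dict.empty : PySem.Dict String (List String))
      = (friends.flatMap (fun p => [(p.1, p.2), (p.2, p.1)])).foldl
          (fun d q => d.modify q.1 [] (· ++ [q.2])) PySem.Dict.empty := by
    rw [List.foldl_flatMap]
    rfl
  rw [h1, PySem.Dict.getD_foldl_modify_append, PySem.Dict.getD_empty]
  simpa using pv_pairs_adj friends c

lemma pv_foldl_max_le_iff (l : List Int) (a b : Int) :
    List.foldl max a l ≤ b ↔ a ≤ b ∧ ∀ x ∈ l, x ≤ b := by
  induction l generalizing a with
  | nil => simp
  | cons h t ih => simp only [List.foldl_cons, ih]; simp; constructor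
                   · rintro ⟨⟨h1, h2⟩, h3⟩; exact ⟨h1, h2, h3⟩
                   · rintro ⟨h1, h2, h3⟩; exact ⟨⟨h1, h2⟩, h3⟩

lemma pv_modify_mem_keys (d : PySem.Dict String Int) (ff k : String) (f : Int → Int) :
    k ∈ (d.modify ff 0 f).keys ↔ k = ff ∨ k ∈ d.keys := by
  rw [PySem.Dict.keys_modify]; exact PySem.Dict.mem_keys_insert _ _ _ _

lemma pv_modify_nodup (d : PySem.Dict String Int) (ff : String) (f : Int → Int)
    (hnd : d.keys.Nodup) : (d.modify ff 0 f).keys.Nodup := by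
  rw [PySem.Dict.keys_modify]; exact PySem.Dict.nodup_keys_insert _ _ _ hnd

lemma pv_modify_max (d : PySem.Dict String Int) (hnd : d.keys.Nodup) (ff : String) :
    (d.modify ff 0 (· + 1)).values.foldl max 0 =
      max (d.values.foldl max 0) ((d.modify ff 0 (· + 1)).getD ff 0) := by
  set d' := d.modify ff 0 (· + 1) with hd'
  have hnd' : d'.keys.Nodup := pv_modify_nodup d ff _ hnd
  have hvals : d.values = d.keys.map (fun k => d.getD k 0) := PySem.Dict.values_eq_map_keys d hnd 0
  have hvals' : d'.values = d'.keys.map (fun k => d'.getD k 0) := PySem.Dict.values_eq_map_keys d' hnd' 0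
  have hget : ∀ k, d'.getD k 0 = if k = ff then d.getD ff 0 + 1 else d.getD k 0 := by
    intro k; rw [hd', PySem.Dict.getD_modify]
  have hffmem : ff ∈ d'.keys := (pv_modify_mem_keys d ff ff _).mpr (Or.inl rfl)
  have hsup : ∀ k ∈ d.keys, k ∈ d'.keys := fun k hk => (pv_modify_mem_keys d ff k _).mpr (Or.inr hk)
  have hdown : ∀ k ∈ d'.keys, k = ff ∨ k ∈ d.keys := fun k hk => (pv_modify_mem_keys d ff k _).mp hk
  have hffval : d'.getD ff 0 ∈ d'.values := by
    rw [hvals']; exact List.mem_map.mpr ⟨ff, hffmem, rfl⟩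
  apply le_antisymm
  · rw [pv_foldl_max_le_iff]
    refine ⟨le_trans (PySem.List.le_foldl_max d.values 0).1 (le_max_left _ _), ?_⟩
    intro v hv
    rw [hvals'] at hv
    obtain ⟨k, hk, rfl⟩ := List.mem_map.mp hv
    by_cases hke : k = ff
    · subst hke; exact le_max_right _ _
    · rw [hget k, if_neg hke]
      rcases hdown k hk with h | h
      · exact absurd h hke
      · have : d.getD k 0 ∈ d.values := by rw [hvals]; exact List.mem_map.mpr ⟨k, h, rfl⟩
        exact le_trans ((PySem.List.le_foldl_max d.values 0).2 _ this) (le_max_left _ _)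
  · apply max_le
    · rw [pv_foldl_max_le_iff]
      refine ⟨(PySem.List.le_foldl_max d'.values 0).1, ?_⟩
      intro v hv
      rw [hvals] at hv
      obtain ⟨k, hk, rfl⟩ := List.mem_map.mp hv
      by_cases hke : k = ff
      · subst hke
        have h1 : d.getD k 0 ≤ d'.getD k 0 := by rw [hget k, if_pos rfl]; omega
        exact le_trans h1 ((PySem.List.le_foldl_max d'.values 0).2 _ hffval)
      · have hmem : d'.getD k 0 ∈ d'.values := by
          rw [hvals']; exact List.mem_map.mpr ⟨k, hsup k hk, rfl⟩
        have h1 : d.getD k 0 = d'.getD k 0 := by rw [hget k, if_neg hke]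
        rw [h1]
        exact (PySem.List.le_foldl_max d'.values 0).2 _ hmem
    · exact (PySem.List.le_foldl_max d'.values 0).2 _ hffval

lemma pvA_fst (u : String) (l : List String) :
    ∀ st : PySem.Dict String Int × Int,
      (l.foldl (pvStepA u) st).1 =
        (l.filter (fun x => x ≠ u)).foldl (fun d x => d.modify x 0 (· + 1)) st.1 := by
  induction l with
  | nil => intro st; rfl
  | cons a t ih =>
    intro st
    by_cases h : a = u <;> simp [pvStepA, h, ih]

lemma pvA_snd (u : String) (l : List String) :
    ∀ st : PySem.Dict String Int × Int, st.1.keys.Nodup →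
      st.2 = st.1.values.foldl max 0 →
      (l.foldl (pvStepA u) st).2 = (l.foldl (pvStepA u) st).1.values.foldl max 0 := by
  induction l with
  | nil => intro st _ h; exact h
  | cons a t ih =>
    intro st hnd h
    by_cases ha : a = u
    · simp only [List.foldl_cons, pvStepA, ha]
      simp only [ne_eq, not_true_eq_false, ite_false]
      exact ih st hnd h
    · have hstep : pvStepA u st a =
          (st.1.modify a 0 (· + 1), max st.2 ((st.1.modify a 0 (· + 1)).getD a 0)) := by
        simp [pvStepA, ha]
      simp only [List.foldl_cons, hstep]
      apply ih
      · exact pv_modify_nodup st.1 a _ hnd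
      · simp only
        rw [pv_modify_max st.1 hnd a, h]

lemma pv_contrib_nonneg (friends : List (String × String)) (u x : String) (p : String × String) :
    0 ≤ pvContrib friends u x p := by
  unfold pvContrib; split_ifs <;> omega

lemma pvB_step_getD (friends : List (String × String)) (u : String)
    (dd : PySem.Dict String Int)
    (hdd : ∀ c', dd.getD c' 0 = ((pvAdj friends u).count c' : Int))
    (c : PySem.Dict String Int) (p : String × String) (x : String) :
    (pvStepB u dd c p).getD x 0 = c.getD x 0 + pvContrib friends u x p := by
  simp only [pvStepB, pvContrib, hdd]
  split_ifs with h1 h2 <;>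
    simp_all [PySem.Dict.getD_insert] <;>
    (try simp_all [List.count_eq_zero]) <;> omega

lemma pvB_step_mem (friends : List (String × String)) (u : String)
    (dd : PySem.Dict String Int)
    (hdd : ∀ c', dd.getD c' 0 = ((pvAdj friends u).count c' : Int))
    (c : PySem.Dict String Int) (p : String × String) (x : String) :
    x ∈ (pvStepB u dd c p).keys ↔ x ∈ c.keys ∨ 0 < pvContrib friends u x p := by
  simp only [pvStepB, pvContrib, hdd]
  split_ifs with h1 h2 <;>
    simp_all [PySem.Dict.mem_keys_insert, List.count_pos_iff] <;> omega

lemma pvB_fold_getD (friends : List (String × String)) (u : String)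
    (dd : PySem.Dict String Int)
    (hdd : ∀ c', dd.getD c' 0 = ((pvAdj friends u).count c' : Int))
    (l : List (String × String)) (x : String) :
    ∀ c, (l.foldl (pvStepB u dd) c).getD x 0 =
      c.getD x 0 + (l.map (pvContrib friends u x)).sum := by
  induction l with
  | nil => simp
  | cons p t ih =>
    intro c
    simp only [List.foldl_cons, List.map_cons, List.sum_cons, ih,
      pvB_step_getD friends u dd hdd c p x]
    ring

lemma pvB_fold_mem (friends : List (String × String)) (u : String)
    (dd : PySem.Dict String Int)
    (hdd : ∀ c', dd.getD c' 0 = ((pvAdj friends u).count c' : Int))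
    (l : List (String × String)) (x : String) :
    ∀ c, x ∈ (l.foldl (pvStepB u dd) c).keys ↔
      x ∈ c.keys ∨ 0 < (l.map (pvContrib friends u x)).sum := by
  induction l with
  | nil => simp
  | cons p t ih =>
    intro c
    have hsumnn : 0 ≤ (t.map (pvContrib friends u x)).sum := by
      apply List.sum_nonneg
      intro y hy
      obtain ⟨q, _, rfl⟩ := List.mem_map.mp hy
      exact pv_contrib_nonneg friends u x q
    have hnn := pv_contrib_nonneg friends u x p
    simp only [List.foldl_cons, List.map_cons, List.sum_cons, ih,
      pvB_step_mem friends u dd hdd c p x]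
    constructor
    · rintro (⟨h | h⟩ | h)
      · exact Or.inl h
      · exact Or.inr (by omega)
      · exact Or.inr (by omega)
    · rintro (h | h)
      · exact Or.inl (Or.inl h)
      · by_cases hp : 0 < pvContrib friends u x p
        · exact Or.inl (Or.inr hp)
        · exact Or.inr (by omega)

lemma pvB_fold_nodup (u : String) (dd : PySem.Dict String Int)
    (l : List (String × String)) :
    ∀ c : PySem.Dict String Int, c.keys.Nodup → (l.foldl (pvStepB u dd) c).keys.Nodup := by
  induction l with
  | nil => intro c h; simpa using h
  | cons p t ih =>
    intro c hc
    refine ih _ ?_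
    simp only [pvStepB]
    split_ifs <;>
      first
      | exact PySem.Dict.nodup_keys_insert _ _ _ (PySem.Dict.nodup_keys_insert _ _ _ hc)
      | exact PySem.Dict.nodup_keys_insert _ _ _ hc
      | exact hc

lemma pv_direct_getD (friends : List (String × String)) (u c : String) :
    (friends.foldl
      (fun d p =>
        let d := if p.1 = u then d.insert p.2 (d.getD p.2 0 + 1) else d
        if p.2 = u then d.insert p.1 (d.getD p.1 0 + 1) else d)
      (PySem.Dict.empty : PySem.Dict String Int)).getD c 0 = ((pvAdj friends u).count c : Int) := by
  have hfun : (fun (d : PySem.Dict String Int) (p : String × String) =>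
        let d := if p.1 = u then d.insert p.2 (d.getD p.2 0 + 1) else d
        if p.2 = u then d.insert p.1 (d.getD p.1 0 + 1) else d)
      = (fun d p => (pvDlist u p).foldl (fun d x => d.insert x (d.getD x 0 + 1)) d) := by
    funext d p
    by_cases h1 : p.1 = u <;> by_cases h2 : p.2 = u <;> simp [pvDlist, h1, h2]
  rw [hfun, ← List.foldl_flatMap]
  show (List.foldl (fun (d : PySem.Dict String Int) x => d.insert x (d.getD x 0 + 1))
      PySem.Dict.empty (pvAdj friends u)).getD c 0 = ((pvAdj friends u).count c : Int)
  rw [PySem.Dict.getD_foldl_insert_add_one, PySem.Dict.getD_empty]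
  simp

lemma pv_count_flatMap {α : Type} (l : List α) (g : α → List String) (x : String) :
    (((l.flatMap g).count x : Int)) = (l.map (fun a => (((g a).count x : Nat) : Int))).sum := by
  induction l with
  | nil => simp
  | cons a t ih => simp [List.count_append, ih]

lemma pv_count_dlist (f x : String) (p : String × String) :
    (((pvDlist f p).count x : Nat) : Int) =
      (if f = p.1 ∧ x = p.2 then (1 : Int) else 0) +
      (if f = p.2 ∧ x = p.1 then (1 : Int) else 0) := by
  unfold pvDlist
  by_cases h1 : p.1 = f <;> by_cases h2 : p.2 = f <;>
    by_cases h3 : x = p.2 <;> by_cases h4 : x = p.1 <;>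
    simp_all [List.count_append, eq_comm]

lemma pv_sum_swap (D : List String) (E : List (String × String))
    (g : String → (String × String) → Int) :
    (D.map (fun f => (E.map (g f)).sum)).sum = (E.map (fun e => (D.map (fun f => g f e)).sum)).sum := by
  induction D with
  | nil => simp
  | cons f t ih =>
    simp only [List.map_cons, List.sum_cons, ih]
    rw [← PySem.List.sum_map_add_int]

lemma pv_sum_ite_count (D : List String) (a : String) :
    (D.map (fun f => if f = a then (1 : Int) else 0)).sum = (D.count a : Int) := by
  induction D with
  | nil => simp
  | cons f t ih =>
    simp only [List.map_cons, List.sum_cons, ih, List.count_cons]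
    by_cases h : f = a <;> simp [h] <;> omega

lemma pv_count_adj (friends : List (String × String)) (f x : String) :
    (((pvAdj friends f).count x : Nat) : Int) =
      (friends.map (fun p =>
        (if f = p.1 ∧ x = p.2 then (1 : Int) else 0) +
        (if f = p.2 ∧ x = p.1 then (1 : Int) else 0))).sum := by
  unfold pvAdj
  rw [pv_count_flatMap]
  exact List.map_congr_left (fun p _ => pv_count_dlist f x p) ▸ rfl

lemma pv_countFF (friends : List (String × String)) (u x : String) (hx : x ≠ u) :
    ((pvFF friends u).count x : Int) = pvCB friends u x := by
  unfold pvFF pvCB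
  rw [List.count_filter (by simpa using hx)]
  rw [pv_count_flatMap]
  have h1 : ((pvAdj friends u).map (fun f => (((pvAdj friends f).count x : Nat) : Int))).sum
      = ((pvAdj friends u).map (fun f => (friends.map (fun p =>
          (if f = p.1 ∧ x = p.2 then (1 : Int) else 0) +
          (if f = p.2 ∧ x = p.1 then (1 : Int) else 0))).sum)).sum :=
    congrArg List.sum (List.map_congr_left (fun f _ => pv_count_adj friends f x))
  rw [h1, pv_sum_swap]
  apply congrArg List.sum
  apply List.map_congr_left
  intro p _
  rw [PySem.List.sum_map_add_int]
  unfold pvContrib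
  congr 1
  · by_cases h : x = p.2
    · have hne : ¬ (p.2 = u) := fun hh => hx (h.trans hh)
      simp only [h, hne, and_true, not_false_iff, if_pos]
      simpa using pv_sum_ite_count (pvAdj friends u) p.1
    · simp [h]
  · by_cases h : x = p.1
    · have hne : ¬ (p.1 = u) := fun hh => hx (h.trans hh)
      simp only [h, hne, and_true, not_false_iff, if_pos]
      simpa using pv_sum_ite_count (pvAdj friends u) p.2
    · simp [h]

lemma pv_mem_FF_ne (friends : List (String × String)) (u x : String)
    (h : x ∈ pvFF friends u) : x ≠ u := by
  unfold pvFF at h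
  have := List.of_mem_filter h
  simpa using this

lemma pv_CB_u_eq_zero (friends : List (String × String)) (u : String) :
    pvCB friends u u = 0 := by
  unfold pvCB
  have : ∀ p ∈ friends, pvContrib friends u u p = 0 := by
    intro p _
    unfold pvContrib
    have h1 : ¬(u = p.2 ∧ ¬p.2 = u) := fun h => h.2 h.1.symm
    have h2 : ¬(u = p.1 ∧ ¬p.1 = u) := fun h => h.2 h.1.symm
    simp [h1, h2]
  rw [List.map_congr_left (by intro p hp; exact this p hp : ∀ p ∈ friends, pvContrib friends u u p = (fun _ => (0:Int)) p)]
  simp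

-- the central equivalence, unconditional
lemma pv_solution_eq (friends : List (String × String)) (u : String) :
    solution friends u = solution_alt friends u := by
  -- ---- A side: reduce to the freq dict F and its running max ----
  have hAfold : solution friends u =
      PySem.List.sorted
        (((pvFF friends u).foldl (fun d x => d.modify x 0 (· + 1))
            (PySem.Dict.empty : PySem.Dict String Int)).items.foldl
          (fun r p =>
            if p.2 = ((pvFF friends u).foldl (fun d x => d.modify x 0 (· + 1))
                (PySem.Dict.empty : PySem.Dict String Int)).values.foldl max 0
            then r ++ [p.1] else r) [])
        (fun x => x) false := by
    simp only [solution, pv_adj_getD]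
    rw [← List.foldl_flatMap]
    have hstA : (fun (st : PySem.Dict String Int × Int) ff =>
        if ff ≠ u then
          let d' := st.1.modify ff 0 (· + 1)
          (d', max st.2 (d'.getD ff 0))
        else st) = pvStepA u := rfl
    rw [hstA]
    have h1 := pvA_fst u ((pvAdj friends u).flatMap (fun f => pvAdj friends f))
      (PySem.Dict.empty, 0)
    have h2 := pvA_snd u ((pvAdj friends u).flatMap (fun f => pvAdj friends f))
      (PySem.Dict.empty, 0) (by simp) (by rfl)
    rw [h1] at h2 ⊢
    rw [h2]
    rfl
  rw [hAfold]
  set F := (pvFF friends u).foldl (fun d x => d.modify x 0 (· + 1))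
    (PySem.Dict.empty : PySem.Dict String Int) with hFdef
  -- ---- B side: reduce to the counts dict C ----
  set dd := friends.foldl
      (fun d p =>
        let d := if p.1 = u then d.insert p.2 (d.getD p.2 0 + 1) else d
        if p.2 = u then d.insert p.1 (d.getD p.1 0 + 1) else d)
      (PySem.Dict.empty : PySem.Dict String Int) with hdddef
  have hdd : ∀ c', dd.getD c' 0 = ((pvAdj friends u).count c' : Int) := fun c' =>
    pv_direct_getD friends u c'
  have hBfold : solution_alt friends u =
      (if (friends.foldl (pvStepB u dd) (PySem.Dict.empty : PySem.Dict String Int)).items = []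
       then []
       else
         PySem.List.sorted
          (((friends.foldl (pvStepB u dd) (PySem.Dict.empty : PySem.Dict String Int)).items.filter
              (fun p => p.2 = (PySem.List.max?
                (friends.foldl (pvStepB u dd) (PySem.Dict.empty : PySem.Dict String Int)).values
                (fun v => v)).getD 0)).map (·.1))
          (fun x => x) false) := by
    simp only [solution_alt]
    rfl
  rw [hBfold]
  set C := friends.foldl (pvStepB u dd) (PySem.Dict.empty : PySem.Dict String Int) with hCdef
  -- ---- facts about F ----
  have hFget : ∀ x, F.getD x 0 = (((pvFF friends u).count x : Nat) : Int) := by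
    intro x
    rw [hFdef, PySem.Dict.getD_foldl_modify_add_one, PySem.Dict.getD_empty]
    simp
  have hFkeys : F.keys = PySem.Set.ofList (pvFF friends u) := by
    rw [hFdef, PySem.Dict.keys_foldl_modify, PySem.Dict.keys_empty, PySem.Set.ofList_eq_foldl]
    rfl
  have hFnodup : F.keys.Nodup := by rw [hFkeys]; exact PySem.Set.nodup_ofList _
  have hFmem : ∀ x, x ∈ F.keys ↔ x ∈ pvFF friends u := by
    intro x; rw [hFkeys]; exact PySem.Set.mem_ofList _ _
  -- ---- facts about C ----
  have hCget : ∀ x, C.getD x 0 = pvCB friends u x := by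
    intro x
    rw [hCdef, pvB_fold_getD friends u dd hdd, PySem.Dict.getD_empty]
    simp [pvCB]
  have hCmem : ∀ x, x ∈ C.keys ↔ 0 < pvCB friends u x := by
    intro x
    rw [hCdef, pvB_fold_mem friends u dd hdd, PySem.Dict.keys_empty]
    simp [pvCB]
  have hCnodup : C.keys.Nodup := by
    rw [hCdef]; exact pvB_fold_nodup u dd friends _ (by simp)
  -- ---- the key sets agree ----
  have hkeysiff : ∀ x, x ∈ F.keys ↔ x ∈ C.keys := by
    intro x
    rw [hFmem, hCmem]
    by_cases hx : x = u
    · rw [hx]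
      constructor
      · intro h; exact absurd rfl (pv_mem_FF_ne friends u u h)
      · intro h; rw [pv_CB_u_eq_zero] at h; omega
    · have hcnt := pv_countFF friends u x hx
      constructor
      · intro h
        have : 0 < (pvFF friends u).count x := List.count_pos_iff.mpr h
        omega
      · intro h
        apply List.count_pos_iff.mp
        omega
  have hperm : F.keys.Perm C.keys :=
    (List.perm_ext_iff_of_nodup hFnodup hCnodup).mpr hkeysiff
  have hgEq : ∀ x ∈ F.keys, F.getD x 0 = C.getD x 0 := by
    intro x hxk
    have hx : x ≠ u := pv_mem_FF_ne friends u x ((hFmem x).mp hxk)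
    rw [hFget, hCget]
    exact pv_countFF friends u x hx
  -- ---- case split on C empty ----
  by_cases hCe : C.items = []
  · rw [if_pos hCe]
    have hCk : C.keys = [] := by
      show C.items.map (·.1) = []
      rw [hCe]; rfl
    have hFk : F.keys = [] := by
      have := hperm
      rw [hCk] at this
      exact this.eq_nil
    have hFi : F.items = [] := by
      have := PySem.Dict.items_eq_map_keys F hFnodup 0
      rw [hFk] at this
      simpa using this
    rw [hFi]
    rfl
  · rw [if_neg hCe]
    have hCvne : C.values ≠ [] := by
      show C.items.map (·.2) ≠ []
      simpa using hCe
    obtain ⟨m, hm⟩ : ∃ m, PySem.List.max? C.values (fun v => v) = some m := by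
      cases hmax : PySem.List.max? C.values (fun v => v) with
      | none => exact absurd (by simpa [PySem.List.max?_eq_none_iff] using hmax) hCvne
      | some m => exact ⟨m, rfl⟩
    rw [hm]
    have hmmem : m ∈ C.values := PySem.List.max?_mem hm
    have hmmax : ∀ y ∈ C.values, y ≤ m := PySem.List.max?_isMax hm
    have hCvals : C.values = C.keys.map (fun k => C.getD k 0) :=
      PySem.Dict.values_eq_map_keys C hCnodup 0
    have hFvals : F.values = F.keys.map (fun k => F.getD k 0) :=
      PySem.Dict.values_eq_map_keys F hFnodup 0
    have hvperm : F.values.Perm C.values := by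
      rw [hFvals, hCvals]
      have h1 : (F.keys.map (fun k => F.getD k 0)).Perm (C.keys.map (fun k => F.getD k 0)) :=
        hperm.map _
      have h2 : C.keys.map (fun k => F.getD k 0) = C.keys.map (fun k => C.getD k 0) :=
        List.map_eq_map_iff.mpr (fun k hk => hgEq k ((hkeysiff k).mpr hk))
      rw [h2] at h1
      exact h1
    have hmpos : 0 < m := by
      rw [hCvals] at hmmem
      obtain ⟨k, hk, rfl⟩ := List.mem_map.mp hmmem
      rw [hCget]
      exact (hCmem k).mp hk
    have hmA : F.values.foldl max 0 = m := by
      rw [hvperm.foldl_op_eq]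
      apply le_antisymm
      · rcases PySem.List.foldl_max_mem C.values 0 with h | h
        · omega
        · exact hmmax _ h
      · exact (PySem.List.le_foldl_max C.values 0).2 _ hmmem
    -- rewrite both result lists as filters over the key lists
    have hAlist : F.items.foldl (fun r p => if p.2 = F.values.foldl max 0 then r ++ [p.1] else r) []
        = F.keys.filter (fun k => F.getD k 0 = m) := by
      have h0 := PySem.List.foldl_append_if
        (fun q : String × Int => decide (q.2 = F.values.foldl max 0)) (fun q => q.1) F.items []
      simp only [decide_eq_true_eq] at h0
      rw [h0, hmA, PySem.Dict.items_eq_map_keys F hFnodup 0, List.filter_map]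
      simp [Function.comp_def]
    have hBlist : (C.items.filter (fun p => p.2 = (some m).getD 0)).map (·.1)
        = C.keys.filter (fun k => C.getD k 0 = m) := by
      rw [PySem.Dict.items_eq_map_keys C hCnodup 0, List.filter_map]
      simp only [Function.comp_def, List.map_map, Option.getD_some, List.map_id_fun', id]
      rfl
    have hfilterperm : (F.keys.filter (fun k => F.getD k 0 = m)).Perm
        (C.keys.filter (fun k => C.getD k 0 = m)) := by
      have h1 : C.keys.filter (fun k => C.getD k 0 = m)
          = C.keys.filter (fun k => F.getD k 0 = m) := by
        apply List.filter_congr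
        intro k hk
        rw [hgEq k ((hkeysiff k).mpr hk)]
      rw [h1]
      exact hperm.filter _
    show PySem.List.sorted
        (F.items.foldl (fun r p => if p.2 = F.values.foldl max 0 then r ++ [p.1] else r) [])
        (fun x => x) false
      = PySem.List.sorted ((C.items.filter (fun p => p.2 = (some m).getD 0)).map (·.1))
        (fun x => x) false
    rw [hAlist, hBlist]
    exact PySem.List.sorted_eq_sorted_of_perm _ _ (fun x => x)
      (fun a b h => h) hfilterperm


-- ===== VERDICT (by name: the statement is the Claim_ definition above) =====
theorem solution_spec : Claim_equal_solution := by
  intro friends user_id _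
  show solution friends user_id = solution_alt friends user_id
  exact pv_solution_eq friends user_id
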